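-- pv_equiv track=rewrite | github.com/amimo/dcc | dex2c/util.py | merge_array_type
-- ===== SOURCE A (Python) =====
-- PRIMITIVE_TYPE_ORDER = {
--     'Z': 1,
--     'B': 2,
--     'S': 3,  # signed
--     'C': 3,  # unsigned
--     'I': 5,
--     'J': 6,
--     'F': 8,
--     'D': 9,
-- }
--
-- def is_primitive_type(atype):
--     return atype and atype in PRIMITIVE_TYPE_ORDER
--
-- def is_int(atype):
--     return atype and atype in 'ZBCSIJ'
--
-- def is_float(atype):
--     return atype and atype in 'FD'
--
-- def is_ref(atype):
--     return atype and (atype[0] == 'L' or atype[0] == '[')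
--
-- def is_array(atype):
--     return atype and atype[0] == '['
--
-- def is_java_lang_object(atype):
--     return atype and atype == 'Ljava/lang/Object;'
--
-- def compare_primitive_type(type1, type2):
--     if type1 is None and type2 is None:
--         return 0
--     if type1 is None:
--         # type1 < type2
--         return -1
--     elif type2 is None:
--         # type1 > type2
--         return 1
--
--     assert is_primitive_type(type1)
--     assert is_primitive_type(type2)
--
--     o1 = PRIMITIVE_TYPE_ORDER.get(type1)
--     o2 = PRIMITIVE_TYPE_ORDER.get(type2)
--     return o1 - o2
--
-- def get_bigger_type(type1, type2):
--     return type1 if compare_primitive_type(type1, type2) > 0 else type2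
--
-- def merge_array_type(type1, type2):
--     assert is_array(type1) or is_array(type2)
--     if is_java_lang_object(type2):
--         return type2
--     elif is_java_lang_object(type1):
--         return type1
--     if is_array(type1):
--         if is_array(type2):
--             new_type = merge_type(type1[1:], type2[1:])
--             if new_type:
--                 return '[' + new_type
--             else:
--                 return None
--         else:
--             return 'Ljava/lang/Object;'
--     else:
--         return merge_array_type(type2, type1)
--
-- def merge_reference_type(type1, type2):
--     assert is_ref(type1) and is_ref(type2)
--     if type1 == type2:
--         return type1
--     elif is_java_lang_object(type1) and is_ref(type2):
--         return type1
--     elif is_java_lang_object(type2) and is_ref(type1):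
--         return type2
--     else:
--         return 'Ljava/lang/Object;'
--
-- def merge_type(type1, type2):
--     if type1 is None and type2 is None:
--         return None
--     if type1 is None:
--         return type2
--     if type2 is None:
--         return type1
--
--     if (is_int(type1) and is_int(type2)) or \
--             (is_float(type1) and is_float(type2)):
--         return get_bigger_type(type1, type2)
--     elif is_array(type1) or is_array(type2):
--         new_type = merge_array_type(type1, type2)
--         if new_type is None:
--             return 'Ljava/lang/Object;'
--         else:
--             return new_type
--     elif is_ref(type1) or is_ref(type2):
--         return merge_reference_type(type1, type2)
--     else:
--         return None
-- ===== SOURCE B (Python) =====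
-- def merge_array_type(type1, type2):
--     OBJ = 'Ljava/lang/Object;'
--     ORDER = {'Z': 1, 'B': 2, 'S': 3, 'C': 3, 'I': 5, 'J': 6, 'F': 8, 'D': 9}
--     assert type1[:1] == '[' or type2[:1] == '['
--     if type2 == OBJ:
--         return type2
--     if type1 == OBJ:
--         return type1
--     if not (type1[:1] == '[' and type2[:1] == '['):
--         return OBJ
--     m = 1
--     while type1[m:m + 1] == '[' and type2[m:m + 1] == '[':
--         m += 1
--     u, v = type1[m:], type2[m:]
--     if u and v and ((u in 'ZBCSIJ' and v in 'ZBCSIJ') or (u in 'FD' and v in 'FD')):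
--         base = u if ORDER[u] > ORDER[v] else v
--     elif u[:1] == '[' or v[:1] == '[':
--         base = OBJ
--     elif u[:1] == 'L' and v[:1] == 'L':
--         base = u if u == v else OBJ
--     else:
--         base = None
--     if base is None:
--         return None if m == 1 else '[' * (m - 1) + OBJ
--     return '[' * m + base
-- ===== Notes on version B (the rewrite author's own statement) =====
-- stated objective: simpler
-- what changed: Replaces A's mutual recursion (merge_array_type <-> merge_type, plus a self-recursive argument swap) by a single direct pass: peel the common '[' prefix with one loop, merge the two element types with a flat case split, and rebuild the bracket prefix.
import Mathlib
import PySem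

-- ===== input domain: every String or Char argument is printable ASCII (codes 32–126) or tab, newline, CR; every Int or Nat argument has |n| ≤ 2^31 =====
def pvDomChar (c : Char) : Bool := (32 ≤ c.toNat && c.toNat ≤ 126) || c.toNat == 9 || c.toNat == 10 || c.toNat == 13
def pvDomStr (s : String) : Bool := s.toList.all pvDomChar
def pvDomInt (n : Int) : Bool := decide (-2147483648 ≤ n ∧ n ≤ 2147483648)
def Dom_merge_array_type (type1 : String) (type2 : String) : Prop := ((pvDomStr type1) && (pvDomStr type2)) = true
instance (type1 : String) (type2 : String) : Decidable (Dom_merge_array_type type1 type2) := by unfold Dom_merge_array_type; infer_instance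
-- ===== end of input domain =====

-- B replaces A's mutual recursion (merge_array_type ↔ merge_type, plus a self-recursive argument
-- swap) by one direct pass: peel the common '[' prefix with a loop, merge the two element types
-- with a flat case split, and rebuild the bracket prefix — objective: simpler.


-- ===== PORT A =====
-- 'Ljava/lang/Object;' as a character list
def pvObj : List Char := ['L','j','a','v','a','/','l','a','n','g','/','O','b','j','e','c','t',';']

def pvIsArr (s : List Char) : Bool := match s with | c :: _ => c == '[' | [] => false

-- is_int / is_float: Python's `atype in 'ZBCSIJ'` is a SUBSTRING test
def pvIsInt (s : List Char) : Bool := !s.isEmpty && PySem.Chars.isIn s ['Z','B','C','S','I','J']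
def pvIsFloat (s : List Char) : Bool := !s.isEmpty && PySem.Chars.isIn s ['F','D']
def pvIsRef (s : List Char) : Bool := match s with | c :: _ => c == 'L' || c == '[' | [] => false

-- PRIMITIVE_TYPE_ORDER.get(key)
def pvOrder (s : List Char) : Option Int :=
  if s = ['Z'] then some 1 else if s = ['B'] then some 2 else if s = ['S'] then some 3
  else if s = ['C'] then some 3 else if s = ['I'] then some 5 else if s = ['J'] then some 6
  else if s = ['F'] then some 8 else if s = ['D'] then some 9 else none

-- compare_primitive_type + get_bigger_type; the arguments here are always strings (never Python
-- None), so the `is None` branches are dead; a failed `assert is_primitive_type` is `none` (raise)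
def pvGetBigger? (t1 t2 : List Char) : Option (List Char) :=
  match pvOrder t1, pvOrder t2 with
  | some o1, some o2 => some (if o1 - o2 > 0 then t1 else t2)
  | _, _ => none

-- merge_reference_type; none = the failed assert (raise)
def pvMergeRef? (t1 t2 : List Char) : Option (List Char) :=
  if !(pvIsRef t1 && pvIsRef t2) then none
  else if t1 = t2 then some t1
  else if t1 = pvObj && pvIsRef t2 then some t1
  else if t2 = pvObj && pvIsRef t1 then some t2
  else some pvObj

-- merge_array_type / merge_type, mutually recursive exactly as in the Python; the Nat is fuel
-- (a totality guard only: the top call passes more than the recursion can consume).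
-- Outer Option: none = an exception propagates; inner Option: none = Python's None value.
mutual
def pvMatA : Nat → List Char → List Char → Option (Option (List Char))
  | 0, _, _ => none
  | n + 1, t1, t2 =>
    if !(pvIsArr t1 || pvIsArr t2) then none   -- assert is_array(type1) or is_array(type2)
    else if t2 = pvObj then some (some t2)
    else if t1 = pvObj then some (some t1)
    else if pvIsArr t1 then
      if pvIsArr t2 then
        match pvMtA n (t1.drop 1) (t2.drop 1) with   -- merge_type(type1[1:], type2[1:])
        | none => none
        | some (some x) => if x.isEmpty then some none else some (some ('[' :: x))
        | some none => some none
      else some (some pvObj)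
    else pvMatA n t2 t1                        -- return merge_array_type(type2, type1)
def pvMtA : Nat → List Char → List Char → Option (Option (List Char))
  | 0, _, _ => none
  | n + 1, t1, t2 =>
    -- both arguments are strings here, never Python None: the `is None` branches are dead
    if (pvIsInt t1 && pvIsInt t2) || (pvIsFloat t1 && pvIsFloat t2) then
      (pvGetBigger? t1 t2).map some
    else if pvIsArr t1 || pvIsArr t2 then
      match pvMatA n t1 t2 with
      | none => none
      | some none => some (some pvObj)         -- if new_type is None: return 'Ljava/lang/Object;'
      | some (some x) => some (some x)
    else if pvIsRef t1 || pvIsRef t2 then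
      (pvMergeRef? t1 t2).map some
    else some none
end

def merge_array_type (type1 : String) (type2 : String) : Option String :=
  match pvMatA (2 * (type1.toList.length + type2.toList.length) + 4) type1.toList type2.toList with
  | some (some x) => some (String.ofList x)
  | _ => none

-- ===== PORT B =====
-- the while loop: count and strip the common leading '[' of both strings
def pvPeel : List Char → List Char → Nat × List Char × List Char
  | '[' :: u, '[' :: v => let r := pvPeel u v; (r.1 + 1, r.2)
  | u, v => (0, (u, v))

def pvOrderTable : List (List Char × Int) :=
  [(['Z'],1), (['B'],2), (['S'],3), (['C'],3), (['I'],5), (['J'],6), (['F'],8), (['D'],9)]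

def pvStartsL (s : List Char) : Bool := match s with | c :: _ => c == 'L' | [] => false

-- merge of the two element types after the brackets are gone (Source B's base computation);
-- the .getD 0 stands for Source B's ORDER[u], which raises KeyError only outside Pre_
def pvBase (u v : List Char) : Option (List Char) :=
  if (!u.isEmpty && !v.isEmpty) &&
      ((PySem.Chars.isIn u ['Z','B','C','S','I','J'] && PySem.Chars.isIn v ['Z','B','C','S','I','J']) ||
       (PySem.Chars.isIn u ['F','D'] && PySem.Chars.isIn v ['F','D'])) then
    some (if (pvOrderTable.lookup u).getD 0 > (pvOrderTable.lookup v).getD 0 then u else v)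
  else if pvIsArr u || pvIsArr v then some pvObj
  else if pvStartsL u && pvStartsL v then some (if u = v then u else pvObj)
  else none

def merge_array_type_alt (type1 : String) (type2 : String) : Option String :=
  let l1 := type1.toList
  let l2 := type2.toList
  if !(pvIsArr l1 || pvIsArr l2) then none   -- assert; none = the raise (outside Pre_)
  else if l2 = pvObj then some (String.ofList l2)
  else if l1 = pvObj then some (String.ofList l1)
  else
    match l1, l2 with
    | '[' :: u0, '[' :: v0 =>
      let p := pvPeel u0 v0
      let m := p.1 + 1
      match pvBase p.2.1 p.2.2 with
      | some r => some (String.ofList (List.replicate m '[' ++ r))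
      | none => if m = 1 then none else some (String.ofList (List.replicate (m - 1) '[' ++ pvObj))
    | _, _ => some (String.ofList pvObj)

-- ===== PRECONDITION & SPEC =====
-- Pre_'s own shape predicates (independent of the ports)
def preArr (s : List Char) : Bool := match s with | c :: _ => c == '[' | [] => false
def preL (s : List Char) : Bool := match s with | c :: _ => c == 'L' | [] => false
def preInt (s : List Char) : Bool := !s.isEmpty && decide (s <:+: ['Z','B','C','S','I','J'])
def preFlt (s : List Char) : Bool := !s.isEmpty && decide (s <:+: ['F','D'])
-- the element types behind the common '[' prefix of the two descriptors
def preStrip : List Char → List Char → List Char × List Char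
  | '[' :: u, '[' :: v => preStrip u v
  | u, v => (u, v)
-- element-type pairs on which A's merge raises an AssertionError (or TypeError):
-- two primitive-like substrings of which one is not a single primitive letter, or
-- a reference type paired with a non-reference non-array type
def preCrash (u v : List Char) : Bool :=
  if (preInt u && preInt v) || (preFlt u && preFlt v) then
    decide (1 < u.length) || decide (1 < v.length)
  else if preArr u || preArr v then false
  else (preL u || preL v) && !(preL u && preL v)

-- Pre_ excludes exactly the inputs on which the Python A raises: those failing the top
-- `assert is_array(type1) or is_array(type2)`, and those whose recursion reaches an element-type
-- pair that fails an assert inside merge_type's helpers (preCrash above).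
def Pre_merge_array_type (type1 : String) (type2 : String) : Prop :=
  (preArr type1.toList || preArr type2.toList) = true ∧
  (type2.toList = ['L','j','a','v','a','/','l','a','n','g','/','O','b','j','e','c','t',';'] ∨
   type1.toList = ['L','j','a','v','a','/','l','a','n','g','/','O','b','j','e','c','t',';'] ∨
   ¬(preArr type1.toList = true ∧ preArr type2.toList = true) ∨
   preCrash (preStrip type1.toList type2.toList).1 (preStrip type1.toList type2.toList).2 = false)
instance (type1 : String) (type2 : String) : Decidable (Pre_merge_array_type type1 type2) := by
  unfold Pre_merge_array_type; infer_instance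

def pvWitness_merge_array_type : String × String := ("[Z", "[Z")

def Spec_merge_array_type (type1 : String) (type2 : String) (out : Option String) : Prop := out = merge_array_type_alt type1 type2
instance (type1 : String) (type2 : String) (out : Option String) : Decidable (Spec_merge_array_type type1 type2 out) := by unfold Spec_merge_array_type; infer_instance

-- ===== CLAIM (what is proved, stated in full; the proofs are below) =====
def Claim_equal_merge_array_type : Prop := ∀ (type1 : String) (type2 : String), Dom_merge_array_type type1 type2 → Pre_merge_array_type type1 type2 → Spec_merge_array_type type1 type2 (merge_array_type type1 type2)

-- ===== LEMMAS AND PROOFS =====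


-- the value merge_type(u, v) returns (when it does not raise), in closed form
def mtVal (u v : List Char) : Option (List Char) :=
  match pvBase (pvPeel u v).2.1 (pvPeel u v).2.2 with
  | some r => some (List.replicate (pvPeel u v).1 '[' ++ r)
  | none => if (pvPeel u v).1 = 0 then none else some (List.replicate ((pvPeel u v).1 - 1) '[' ++ pvObj)

lemma isIn_eq_decide (u l : List Char) : PySem.Chars.isIn u l = decide (u <:+: l) := by
  by_cases h : u <:+: l
  · simp [h, (PySem.Chars.isIn_iff_infix u l).2 h]
  · simp only [h, decide_false]
    exact Bool.eq_false_iff.2 (fun hc => h ((PySem.Chars.isIn_iff_infix u l).1 hc))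

lemma pvIsInt_eq (u : List Char) : pvIsInt u = preInt u := by
  simp [pvIsInt, preInt, isIn_eq_decide]
lemma pvIsFloat_eq (u : List Char) : pvIsFloat u = preFlt u := by
  simp [pvIsFloat, preFlt, isIn_eq_decide]
lemma pvIsArr_eq (u : List Char) : pvIsArr u = preArr u := rfl
lemma pvStartsL_eq (u : List Char) : pvStartsL u = preL u := rfl

lemma preInt_of_head (c : Char) (u : List Char) (hc : ¬ c ∈ (['Z','B','C','S','I','J'] : List Char)) :
    preInt (c :: u) = false := by
  simp only [preInt, List.isEmpty_cons, Bool.not_false, Bool.true_and, decide_eq_false_iff_not]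
  intro h
  exact hc (h.subset (List.mem_cons_self ..))

lemma preFlt_of_head (c : Char) (u : List Char) (hc : ¬ c ∈ (['F','D'] : List Char)) :
    preFlt (c :: u) = false := by
  simp only [preFlt, List.isEmpty_cons, Bool.not_false, Bool.true_and, decide_eq_false_iff_not]
  intro h
  exact hc (h.subset (List.mem_cons_self ..))

lemma preArr_iff (u : List Char) : preArr u = true ↔ ∃ a, u = '[' :: a := by
  cases u with
  | nil => simp [preArr]
  | cons c t => simp [preArr]

lemma preStrip_eq_pvPeel (u v : List Char) : preStrip u v = (pvPeel u v).2 := by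
  fun_induction pvPeel u v with
  | case1 u v r ih => simpa [preStrip] using ih
  | case2 u v h =>
    rw [preStrip.eq_def]
    split
    all_goals first
      | rfl
      | (exact (h _ _ rfl rfl).elim)

lemma pvPeel_of_not_arr (u v : List Char)
    (h : ¬(preArr u = true ∧ preArr v = true)) : pvPeel u v = (0, (u, v)) := by
  rw [pvPeel.eq_def]
  split
  all_goals first
    | rfl
    | (exact absurd ⟨(preArr_iff _).2 ⟨_, rfl⟩, (preArr_iff _).2 ⟨_, rfl⟩⟩ h)

lemma bool_factor (x y b1 b2 b3 b4 : Bool) :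
    (((x && b1) && (y && b2)) || ((x && b3) && (y && b4))) = ((x && y) && ((b1 && b2) || (b3 && b4))) := by
  cases x <;> cases y <;> cases b1 <;> cases b2 <;> cases b3 <;> cases b4 <;> rfl

lemma pvBase_cond_eq (u v : List Char) :
    ((pvIsInt u && pvIsInt v) || (pvIsFloat u && pvIsFloat v)) =
      ((!u.isEmpty && !v.isEmpty) &&
        ((PySem.Chars.isIn u ['Z','B','C','S','I','J'] && PySem.Chars.isIn v ['Z','B','C','S','I','J']) ||
         (PySem.Chars.isIn u ['F','D'] && PySem.Chars.isIn v ['F','D']))) := by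
  unfold pvIsInt pvIsFloat
  exact bool_factor ..

lemma arr_ne_obj (u : List Char) (h : preArr u = true) : u ≠ pvObj := by
  obtain ⟨a, rfl⟩ := (preArr_iff u).1 h
  simp [pvObj]

lemma isRef_eq_preL (u : List Char) (h : preArr u = false) : pvIsRef u = preL u := by
  cases u with
  | nil => rfl
  | cons c t => simp_all [pvIsRef, preL, preArr]

lemma pvBase_ne_nil (u v : List Char) : pvBase u v ≠ some [] := by
  unfold pvBase
  split_ifs with h1 h2 h3 h4 h5 <;> intro hc <;> simp_all [pvObj, pvStartsL]

lemma mt_bot (u v : List Char) (k : Nat)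
    (hna : ¬(preArr u = true ∧ preArr v = true))
    (hok : preCrash u v = false) :
    pvMtA (k + 3) u v = some (mtVal u v) := by
  have hpeel : pvPeel u v = (0, (u, v)) := pvPeel_of_not_arr u v hna
  have hval : mtVal u v = pvBase u v := by
    unfold mtVal
    rw [hpeel]
    cases hb : pvBase u v <;> simp
  rw [hval]
  rw [pvMtA]
  by_cases hc1 : ((pvIsInt u && pvIsInt v) || (pvIsFloat u && pvIsFloat v)) = true
  · rw [if_pos hc1]
    have hcr : (decide (1 < u.length) || decide (1 < v.length)) = false := by
      unfold preCrash at hok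
      rw [pvIsInt_eq, pvIsInt_eq, pvIsFloat_eq, pvIsFloat_eq] at hc1
      rw [if_pos hc1] at hok
      exact hok
    simp only [Bool.or_eq_false_iff, decide_eq_false_iff_not, not_lt] at hcr
    have hbase : pvBase u v = some (if (pvOrderTable.lookup u).getD 0 > (pvOrderTable.lookup v).getD 0 then u else v) := by
      unfold pvBase
      rw [if_pos (by rw [← pvBase_cond_eq]; exact hc1)]
    rw [hbase]
    rcases Bool.or_eq_true_iff.1 hc1 with h | h
    · simp only [Bool.and_eq_true, pvIsInt] at h
      obtain ⟨⟨hu0, hu⟩, ⟨hv0, hv⟩⟩ := h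
      obtain ⟨a, rfl⟩ : ∃ a, u = [a] := by
        cases u with
        | nil => simp at hu0
        | cons a t =>
          cases t with
          | nil => exact ⟨a, rfl⟩
          | cons b t' => simp at hcr
      obtain ⟨b, rfl⟩ : ∃ b, v = [b] := by
        cases v with
        | nil => simp at hv0
        | cons a t =>
          cases t with
          | nil => exact ⟨a, rfl⟩
          | cons b t' => simp at hcr
      have ha : a ∈ (['Z','B','C','S','I','J'] : List Char) :=
        ((PySem.Chars.isIn_iff_infix _ _).1 hu).subset (List.mem_singleton_self a)
      have hb : b ∈ (['Z','B','C','S','I','J'] : List Char) :=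
        ((PySem.Chars.isIn_iff_infix _ _).1 hv).subset (List.mem_singleton_self b)
      fin_cases ha <;> fin_cases hb <;> decide
    · simp only [Bool.and_eq_true, pvIsFloat] at h
      obtain ⟨⟨hu0, hu⟩, ⟨hv0, hv⟩⟩ := h
      obtain ⟨a, rfl⟩ : ∃ a, u = [a] := by
        cases u with
        | nil => simp at hu0
        | cons a t =>
          cases t with
          | nil => exact ⟨a, rfl⟩
          | cons b t' => simp at hcr
      obtain ⟨b, rfl⟩ : ∃ b, v = [b] := by
        cases v with
        | nil => simp at hv0
        | cons a t =>
          cases t with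
          | nil => exact ⟨a, rfl⟩
          | cons b t' => simp at hcr
      have ha : a ∈ (['F','D'] : List Char) :=
        ((PySem.Chars.isIn_iff_infix _ _).1 hu).subset (List.mem_singleton_self a)
      have hb : b ∈ (['F','D'] : List Char) :=
        ((PySem.Chars.isIn_iff_infix _ _).1 hv).subset (List.mem_singleton_self b)
      fin_cases ha <;> fin_cases hb <;> decide
  · rw [if_neg hc1]
    have hbasec : pvBase u v =
        (if (pvIsArr u || pvIsArr v) = true then some pvObj
         else if (pvStartsL u && pvStartsL v) = true then some (if u = v then u else pvObj)
         else none) := by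
      unfold pvBase
      rw [if_neg (by rw [← pvBase_cond_eq]; exact hc1)]
    by_cases hc2 : (pvIsArr u || pvIsArr v) = true
    · rw [if_pos hc2, hbasec, if_pos hc2]
      -- evaluate pvMatA (k + 2) u v
      rw [pvMatA]
      rw [hc2]
      simp only [Bool.not_true, Bool.false_eq_true, if_false]
      by_cases hv2 : v = pvObj
      · rw [if_pos hv2]
        simp [hv2]
      · rw [if_neg hv2]
        by_cases hu2 : u = pvObj
        · rw [if_pos hu2]
          simp [hu2]
        · rw [if_neg hu2]
          by_cases ha1 : pvIsArr u = true
          · rw [if_pos ha1]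
            have ha2 : pvIsArr v = false := by
              rw [pvIsArr_eq] at ha1 ⊢
              rcases Bool.eq_false_or_eq_true (preArr v) with h | h
              · exact absurd ⟨ha1, h⟩ hna
              · exact h
            rw [ha2]
            simp
          · rw [if_neg ha1]
            have ha2 : pvIsArr v = true := by
              rcases Bool.or_eq_true_iff.1 hc2 with h | h
              · exact absurd h ha1
              · exact h
            have ha1' : pvIsArr u = false := Bool.eq_false_iff.2 ha1
            rw [pvMatA]
            rw [ha2, ha1']
            simp only [Bool.false_eq_true, if_false]
            rw [if_neg hu2]
            have : v ≠ pvObj := arr_ne_obj v (by rw [← pvIsArr_eq]; exact ha2)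
            rw [if_neg this]
            simp
    · rw [if_neg hc2, hbasec, if_neg hc2]
      -- neither is an array; pvIsRef coincides with preL
      have harru : preArr u = false := by
        rcases Bool.eq_false_or_eq_true (preArr u) with h | h
        · exact absurd (by rw [Bool.or_eq_true_iff]; left; rw [pvIsArr_eq]; exact h) hc2
        · exact h
      have harrv : preArr v = false := by
        rcases Bool.eq_false_or_eq_true (preArr v) with h | h
        · exact absurd (by rw [Bool.or_eq_true_iff]; right; rw [pvIsArr_eq]; exact h) hc2
        · exact h
      have hrefu : pvIsRef u = preL u := isRef_eq_preL u harru
      have hrefv : pvIsRef v = preL v := isRef_eq_preL v harrv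
      have hxor : ((preL u || preL v) && !(preL u && preL v)) = false := by
        unfold preCrash at hok
        rw [if_neg (by rw [pvIsInt_eq, pvIsInt_eq, pvIsFloat_eq, pvIsFloat_eq] at hc1; exact hc1)] at hok
        rw [if_neg (by rw [pvIsArr_eq, pvIsArr_eq] at hc2; exact hc2)] at hok
        exact hok
      by_cases hL : (preL u || preL v) = true
      · -- both start with 'L'
        have hboth : (preL u && preL v) = true := by
          cases hpu : preL u <;> cases hpv : preL v <;> simp_all
        rw [if_pos (by rw [hrefu, hrefv]; exact hL)]
        have hboth' : preL u = true ∧ preL v = true := by rw [Bool.and_eq_true] at hboth; exact hboth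
        have hLu : preL u = true := hboth'.1
        have hLv : preL v = true := hboth'.2
        rw [if_pos (by rw [pvStartsL_eq, pvStartsL_eq, hLu, hLv]; rfl)]
        unfold pvMergeRef?
        rw [if_neg (by rw [hrefu, hrefv, hLu, hLv]; simp)]
        by_cases heq : u = v
        · rw [if_pos heq, if_pos heq]
          simp
        · rw [if_neg heq, if_neg heq]
          by_cases ho1 : u = pvObj
          · rw [if_pos (by rw [ho1, hrefv, hLv]; simp)]
            simp [ho1]
          · rw [if_neg (by rw [hrefv, hLv]; simp; intro hcc; exact absurd hcc ho1)]
            by_cases ho2 : v = pvObj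
            · rw [if_pos (by rw [ho2, hrefu, hLu]; simp)]
              simp [ho2]
            · rw [if_neg (by rw [hrefu, hLu]; simp; intro hcc; exact absurd hcc ho2)]
              simp
      · -- neither starts with 'L'
        have hLf : (preL u || preL v) = false := by
          cases h : (preL u || preL v)
          · rfl
          · exact absurd h hL
        rw [if_neg (by rw [hrefu, hrefv]; rw [Bool.or_eq_false_iff] at hLf; simp [hLf.1, hLf.2])]
        rw [if_neg (by rw [pvStartsL_eq, pvStartsL_eq]; rw [Bool.or_eq_false_iff] at hLf; simp [hLf.1])]

lemma preInt_bracket (u : List Char) : preInt ('[' :: u) = false :=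
  preInt_of_head _ _ (by decide)
lemma preFlt_bracket (u : List Char) : preFlt ('[' :: u) = false :=
  preFlt_of_head _ _ (by decide)
lemma bracket_ne_obj (u : List Char) : ('[' :: u) ≠ pvObj := by simp [pvObj]

lemma mt_eval (u : List Char) : ∀ (v : List Char) (n : Nat),
    2 * (u.length + v.length) + 3 ≤ n →
    preCrash (pvPeel u v).2.1 (pvPeel u v).2.2 = false →
    pvMtA n u v = some (mtVal u v) := by
  induction u with
  | nil =>
    intro v n h hok
    obtain ⟨k, rfl⟩ : ∃ k, n = k + 3 := ⟨n - 3, by omega⟩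
    have hna : ¬(preArr ([] : List Char) = true ∧ preArr v = true) := by simp [preArr]
    rw [pvPeel_of_not_arr _ v hna] at hok
    exact mt_bot _ v k hna hok
  | cons c u₂ ih =>
    intro v n h hok
    by_cases hsplit : c = '[' ∧ ∃ b, v = '[' :: b
    · obtain ⟨rfl, b, rfl⟩ := hsplit
      obtain ⟨k, rfl⟩ : ∃ k, n = k + 3 := ⟨n - 3, by omega⟩
      have hpe : pvPeel ('[' :: u₂) ('[' :: b) = ((pvPeel u₂ b).1 + 1, (pvPeel u₂ b).2) := by
        rw [pvPeel]
      rw [hpe] at hok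
      -- unfold merge_type one step: the int/float test fails, the array branch is taken
      rw [pvMtA]
      rw [if_neg (by
        rw [pvIsInt_eq, pvIsInt_eq, pvIsFloat_eq, pvIsFloat_eq,
            preInt_bracket, preFlt_bracket]
        simp)]
      rw [if_pos (by simp [pvIsArr])]
      -- unfold merge_array_type: both are arrays, neither is the object type
      rw [pvMatA]
      rw [if_neg (by simp [pvIsArr])]
      rw [if_neg (bracket_ne_obj b), if_neg (bracket_ne_obj u₂)]
      rw [if_pos (by simp [pvIsArr]), if_pos (by simp [pvIsArr])]
      simp only [List.drop_succ_cons, List.drop_zero]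
      rw [ih b (k + 1) (by simp at h ⊢; omega) hok]
      -- combine the wrappers with the closed form
      unfold mtVal
      rw [hpe]
      cases hbq : pvBase (pvPeel u₂ b).2.1 (pvPeel u₂ b).2.2 with
      | some r =>
        have hr : (List.replicate (pvPeel u₂ b).1 '[' ++ r) ≠ [] := by
          intro hc
          rcases List.append_eq_nil_iff.1 hc with ⟨-, hr0⟩
          exact pvBase_ne_nil _ _ (hr0 ▸ hbq)
        simp only [hbq]
        rw [if_neg (by simpa using hr)]
        simp [List.replicate_succ]
      | none =>
        simp only [hbq]
        rcases Nat.eq_zero_or_pos (pvPeel u₂ b).1 with hq | hq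
        · rw [hq]
          simp
        · have hne : (List.replicate ((pvPeel u₂ b).1 - 1) '[' ++ pvObj).isEmpty = false := by
            simp [pvObj]
          have heq : List.replicate (pvPeel u₂ b).1 '[' = '[' :: List.replicate ((pvPeel u₂ b).1 - 1) '[' := by
            conv_lhs => rw [show (pvPeel u₂ b).1 = ((pvPeel u₂ b).1 - 1) + 1 from by omega]
            rw [List.replicate_succ]
          simp only [if_neg (show ¬(pvPeel u₂ b).1 = 0 from by omega),
            if_neg (show ¬(pvPeel u₂ b).1 + 1 = 0 from by omega)]
          simp [hne, heq]
    · have hna : ¬(preArr (c :: u₂) = true ∧ preArr v = true) := by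
        rintro ⟨h1, h2⟩
        obtain ⟨a, ha⟩ := (preArr_iff _).1 h1
        obtain ⟨b, hb⟩ := (preArr_iff _).1 h2
        exact hsplit ⟨by injection ha with h1 h2, ⟨b, hb⟩⟩
      obtain ⟨k, rfl⟩ : ∃ k, n = k + 3 := ⟨n - 3, by omega⟩
      rw [pvPeel_of_not_arr _ _ hna] at hok
      exact mt_bot _ _ k hna hok

lemma alt_obj2 (t1 t2 : String) (harr : (pvIsArr t1.toList || pvIsArr t2.toList) = true)
    (h2 : t2.toList = pvObj) :
    merge_array_type_alt t1 t2 = some (String.ofList t2.toList) := by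
  unfold merge_array_type_alt
  rw [if_neg (by rw [harr]; simp), if_pos h2]

lemma alt_obj1 (t1 t2 : String) (harr : (pvIsArr t1.toList || pvIsArr t2.toList) = true)
    (h2 : t2.toList ≠ pvObj) (h1 : t1.toList = pvObj) :
    merge_array_type_alt t1 t2 = some (String.ofList t1.toList) := by
  unfold merge_array_type_alt
  rw [if_neg (by rw [harr]; simp), if_neg h2, if_pos h1]

lemma alt_one_arr (t1 t2 : String) (harr : (pvIsArr t1.toList || pvIsArr t2.toList) = true)
    (h2 : t2.toList ≠ pvObj) (h1 : t1.toList ≠ pvObj)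
    (hno : ¬(preArr t1.toList = true ∧ preArr t2.toList = true)) :
    merge_array_type_alt t1 t2 = some (String.ofList pvObj) := by
  unfold merge_array_type_alt
  rw [if_neg (by rw [harr]; simp), if_neg h2, if_neg h1]
  split
  · rename_i e1 e2
    exact absurd ⟨by rw [e1]; simp [preArr], by rw [e2]; simp [preArr]⟩ hno
  · rfl

lemma alt_both (t1 t2 : String) (u0 v0 : List Char)
    (hu0 : t1.toList = '[' :: u0) (hv0 : t2.toList = '[' :: v0) :
    merge_array_type_alt t1 t2 =
      (match pvBase (pvPeel u0 v0).2.1 (pvPeel u0 v0).2.2 with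
       | some r => some (String.ofList (List.replicate ((pvPeel u0 v0).1 + 1) '[' ++ r))
       | none => if (pvPeel u0 v0).1 + 1 = 1 then none
                 else some (String.ofList (List.replicate ((pvPeel u0 v0).1 + 1 - 1) '[' ++ pvObj))) := by
  unfold merge_array_type_alt
  rw [if_neg (by rw [hu0]; simp [pvIsArr])]
  rw [if_neg (by rw [hv0]; exact bracket_ne_obj v0), if_neg (by rw [hu0]; exact bracket_ne_obj u0)]
  rw [hu0, hv0]
  rfl

theorem merge_array_type_spec : Claim_equal_merge_array_type := by
  unfold Claim_equal_merge_array_type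
  intro t1 t2 _ hpre
  unfold Spec_merge_array_type
  obtain ⟨hpre1, hpre2⟩ := hpre
  have harr : (pvIsArr t1.toList || pvIsArr t2.toList) = true := by
    rw [pvIsArr_eq, pvIsArr_eq]; exact hpre1
  unfold merge_array_type
  rw [pvMatA]
  rw [if_neg (by rw [harr]; simp)]
  by_cases h2 : t2.toList = pvObj
  · rw [if_pos h2, alt_obj2 t1 t2 harr h2]
  · rw [if_neg h2]
    by_cases h1 : t1.toList = pvObj
    · rw [if_pos h1, alt_obj1 t1 t2 harr h2 h1]
    · rw [if_neg h1]
      by_cases hboth : preArr t1.toList = true ∧ preArr t2.toList = true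
      · obtain ⟨ha1, ha2⟩ := hboth
        obtain ⟨u0, hu0⟩ := (preArr_iff _).1 ha1
        obtain ⟨v0, hv0⟩ := (preArr_iff _).1 ha2
        have hok : preCrash (preStrip t1.toList t2.toList).1 (preStrip t1.toList t2.toList).2 = false := by
          rcases hpre2 with h | h | h | h
          · exact absurd h h2
          · exact absurd h h1
          · exact absurd ⟨ha1, ha2⟩ h
          · exact h
        rw [hu0, hv0, preStrip, preStrip_eq_pvPeel] at hok
        rw [alt_both t1 t2 u0 v0 hu0 hv0]
        rw [hu0, hv0]
        rw [if_pos (by simp [pvIsArr]), if_pos (by simp [pvIsArr])]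
        simp only [List.drop_succ_cons, List.drop_zero]
        rw [mt_eval u0 v0 _ (by simp; omega) hok]
        unfold mtVal
        cases hbq : pvBase (pvPeel u0 v0).2.1 (pvPeel u0 v0).2.2 with
        | some r =>
          have hr : (List.replicate (pvPeel u0 v0).1 '[' ++ r) ≠ [] := by
            intro hc
            rcases List.append_eq_nil_iff.1 hc with ⟨-, hr0⟩
            exact pvBase_ne_nil _ _ (hr0 ▸ hbq)
          simp only [hbq]
          rw [if_neg (by simpa using hr)]
          simp [List.replicate_succ]
        | none =>
          simp only [hbq]
          rcases Nat.eq_zero_or_pos (pvPeel u0 v0).1 with hq | hq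
          · rw [hq]
            simp
          · have hne : (List.replicate ((pvPeel u0 v0).1 - 1) '[' ++ pvObj).isEmpty = false := by
              simp [pvObj]
            have heq : List.replicate (pvPeel u0 v0).1 '[' = '[' :: List.replicate ((pvPeel u0 v0).1 - 1) '[' := by
              conv_lhs => rw [show (pvPeel u0 v0).1 = ((pvPeel u0 v0).1 - 1) + 1 from by omega]
              rw [List.replicate_succ]
            simp only [if_neg (show ¬(pvPeel u0 v0).1 = 0 from by omega),
              if_neg (show ¬(pvPeel u0 v0).1 + 1 = 1 from by omega)]
            simp [hne, heq]
      · rw [alt_one_arr t1 t2 harr h2 h1 hboth]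
        have h1' : pvIsArr t1.toList = true → pvIsArr t2.toList = false := by
          intro hA1
          rcases Bool.eq_false_or_eq_true (pvIsArr t2.toList) with h | h
          · exact absurd ⟨by rw [← pvIsArr_eq]; exact hA1, by rw [← pvIsArr_eq]; exact h⟩ hboth
          · exact h
        by_cases hA1 : pvIsArr t1.toList = true
        · rw [if_pos hA1, h1' hA1]
          simp
        · have hA1' : pvIsArr t1.toList = false := Bool.eq_false_iff.2 hA1
          have hA2 : pvIsArr t2.toList = true := by
            rcases Bool.or_eq_true_iff.1 harr with h | h
            · exact absurd h hA1
            · exact h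
          rw [if_neg hA1]
          rw [pvMatA]
          rw [if_neg (by rw [hA2]; simp)]
          rw [if_neg h1, if_neg h2]
          rw [if_pos hA2, hA1']
          simp
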